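-- pv_equiv track=rewrite | github.com/ReinforceAI/research | test_cases/021025/test_cases.py | determine_relationship_category
-- ===== SOURCE A (Python) =====
-- def determine_relationship_category(label):
--     """Determines relationship category from label"""
--     if 'error' in label or 'correction' in label:
--         return 'error_driven'
--     elif 'pattern' in label or 'insight' in label:
--         return 'insight'
--     elif 'learning' in label or 'understanding' in label:
--         return 'learning_process'
--     elif 'color' in label or 'rhythm' in label or 'sensory' in label:
--         return 'multimodal'
--     elif 'emotion' in label or 'feeling' in label:
--         return 'emotional'
--     elif 'practice' in label or 'time' in label:
--         return 'temporal'
--     elif 'novel' in label or 'create' in label: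
--         return 'creative'
--     elif 'physics' in label or 'biology' in label:
--         return 'cross_domain'
--     elif 'meta' in label or 'strategy' in label:
--         return 'meta_learning'
--     elif 'balance' in label or 'equilibrium' in label:
--         return 'contextual'
--     elif 'abstract' in label or 'emergence' in label:
--         return 'abstraction'
--     elif '-' in label and not any(x in label for x in ['meta', 'error', 'pattern']):
--         return 'direct'
--     elif any(x in label for x in ['animal', 'mammal']):
--         return 'hierarchical'
--     elif any(x in label for x in ['teacher', 'mentor', 'parent']):
--         return 'analogical'
--     elif any(x in label for x in ['quantum', 'neural', 'database']):
--         return 'technical'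
--     return 'control'  # default case
-- ===== SOURCE B (Python) =====
-- # Reverse-priority scan: keywords listed from LOWEST to HIGHEST priority; a single
-- # pass overwrites the category on every match, so the last write (= highest-priority
-- # matching keyword) wins.  The original 'direct' rule's exclusion of meta/error/pattern
-- # is redundant here: those keywords carry a higher priority than '-' and therefore
-- # overwrite 'direct' later in the scan, exactly as A's earlier if-branches pre-empt it.
-- _KEYWORDS_ASCENDING = [
--     ('database', 'technical'), ('neural', 'technical'), ('quantum', 'technical'),
--     ('parent', 'analogical'), ('mentor', 'analogical'), ('teacher', 'analogical'),
--     ('mammal', 'hierarchical'), ('animal', 'hierarchical'),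
--     ('-', 'direct'),
--     ('emergence', 'abstraction'), ('abstract', 'abstraction'),
--     ('equilibrium', 'contextual'), ('balance', 'contextual'),
--     ('strategy', 'meta_learning'), ('meta', 'meta_learning'),
--     ('biology', 'cross_domain'), ('physics', 'cross_domain'),
--     ('create', 'creative'), ('novel', 'creative'),
--     ('time', 'temporal'), ('practice', 'temporal'),
--     ('feeling', 'emotional'), ('emotion', 'emotional'),
--     ('rhythm', 'multimodal'), ('sensory', 'multimodal'), ('color', 'multimodal'),
--     ('understanding', 'learning_process'), ('learning', 'learning_process'),
--     ('insight', 'insight'), ('pattern', 'insight'),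
--     ('correction', 'error_driven'), ('error', 'error_driven'),
-- ]
--
-- def determine_relationship_category(label):
--     """Determines relationship category from label"""
--     category = 'control'
--     for keyword, cat in _KEYWORDS_ASCENDING:
--         if keyword in label:
--             category = cat
--     return category
-- ===== Notes on version B (the rewrite author's own statement) =====
-- stated objective: alternative
-- what changed: Replaces the 15-branch first-match if/elif chain by a single last-write-wins scan over a keyword table ordered from lowest to highest priority, which also makes the direct rule's exclusion clause unnecessary (the excluded keywords carry higher priority and overwrite it later in the scan).
import Mathlib
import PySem

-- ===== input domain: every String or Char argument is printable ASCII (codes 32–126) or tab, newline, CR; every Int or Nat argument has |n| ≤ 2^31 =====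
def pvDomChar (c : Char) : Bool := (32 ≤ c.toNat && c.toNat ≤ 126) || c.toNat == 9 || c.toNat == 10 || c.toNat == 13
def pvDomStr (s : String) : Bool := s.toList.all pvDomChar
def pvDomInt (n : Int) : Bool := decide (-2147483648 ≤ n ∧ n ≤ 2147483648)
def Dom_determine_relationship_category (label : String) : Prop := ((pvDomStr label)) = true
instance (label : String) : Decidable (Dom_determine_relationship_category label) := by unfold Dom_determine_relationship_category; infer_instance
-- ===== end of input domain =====

-- B replaces A's 15-branch first-match if/elif chain by a single reverse-priority scan over a
-- keyword table with last-write-wins overwrite (alternative decomposition, same cost).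

-- B replaces A's 15-branch first-match if/elif chain by a single reverse-priority scan over a
-- keyword table with last-write-wins overwrite (alternative decomposition, same cost).
-- ===== PORT A =====
def determine_relationship_category (label : String) : String :=
  if PySem.Str.isIn "error" label || PySem.Str.isIn "correction" label then "error_driven"
  else if PySem.Str.isIn "pattern" label || PySem.Str.isIn "insight" label then "insight"
  else if PySem.Str.isIn "learning" label || PySem.Str.isIn "understanding" label then "learning_process"
  else if PySem.Str.isIn "color" label || PySem.Str.isIn "rhythm" label || PySem.Str.isIn "sensory" label then "multimodal"
  else if PySem.Str.isIn "emotion" label || PySem.Str.isIn "feeling" label then "emotional"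
  else if PySem.Str.isIn "practice" label || PySem.Str.isIn "time" label then "temporal"
  else if PySem.Str.isIn "novel" label || PySem.Str.isIn "create" label then "creative"
  else if PySem.Str.isIn "physics" label || PySem.Str.isIn "biology" label then "cross_domain"
  else if PySem.Str.isIn "meta" label || PySem.Str.isIn "strategy" label then "meta_learning"
  else if PySem.Str.isIn "balance" label || PySem.Str.isIn "equilibrium" label then "contextual"
  else if PySem.Str.isIn "abstract" label || PySem.Str.isIn "emergence" label then "abstraction"
  else if PySem.Str.isIn "-" label && !(["meta", "error", "pattern"].any (fun x => PySem.Str.isIn x label)) then "direct"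
  else if ["animal", "mammal"].any (fun x => PySem.Str.isIn x label) then "hierarchical"
  else if ["teacher", "mentor", "parent"].any (fun x => PySem.Str.isIn x label) then "analogical"
  else if ["quantum", "neural", "database"].any (fun x => PySem.Str.isIn x label) then "technical"
  else "control"

-- ===== PORT B =====
-- keywords from LOWEST to HIGHEST priority; the scan overwrites on every match, last write wins
def pvKeywordsAscending : List (String × String) :=
  [ ("database", "technical"),
    ("neural", "technical"),
    ("quantum", "technical"),
    ("parent", "analogical"),
    ("mentor", "analogical"),
    ("teacher", "analogical"),
    ("mammal", "hierarchical"),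
    ("animal", "hierarchical"),
    ("-", "direct"),
    ("emergence", "abstraction"),
    ("abstract", "abstraction"),
    ("equilibrium", "contextual"),
    ("balance", "contextual"),
    ("strategy", "meta_learning"),
    ("meta", "meta_learning"),
    ("biology", "cross_domain"),
    ("physics", "cross_domain"),
    ("create", "creative"),
    ("novel", "creative"),
    ("time", "temporal"),
    ("practice", "temporal"),
    ("feeling", "emotional"),
    ("emotion", "emotional"),
    ("rhythm", "multimodal"),
    ("sensory", "multimodal"),
    ("color", "multimodal"),
    ("understanding", "learning_process"),
    ("learning", "learning_process"),
    ("insight", "insight"),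
    ("pattern", "insight"),
    ("correction", "error_driven"),
    ("error", "error_driven") ]

def determine_relationship_category_alt (label : String) : String :=
  pvKeywordsAscending.foldl
    (fun category kv => if PySem.Str.isIn kv.1 label then kv.2 else category) "control"

-- ===== PRECONDITION & SPEC =====
def Spec_determine_relationship_category (label : String) (out : String) : Prop := out = determine_relationship_category_alt label
instance (label : String) (out : String) : Decidable (Spec_determine_relationship_category label out) := by unfold Spec_determine_relationship_category; infer_instance

-- ===== CLAIM =====
def Claim_equal_determine_relationship_category : Prop := ∀ (label : String), Dom_determine_relationship_category label → Spec_determine_relationship_category label (determine_relationship_category label)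

-- ===== LEMMAS AND PROOFS =====

-- ===== VERDICT =====
theorem determine_relationship_category_spec : Claim_equal_determine_relationship_category := by
  intro label _
  unfold Spec_determine_relationship_category determine_relationship_category determine_relationship_category_alt pvKeywordsAscending
  cases h0 : PySem.Chars.isIn ['e', 'r', 'r', 'o', 'r'] label.toList
  case true => simp [List.foldl, h0]
  cases h1 : PySem.Chars.isIn ['c', 'o', 'r', 'r', 'e', 'c', 't', 'i', 'o', 'n'] label.toList
  case true => simp [List.foldl, h0, h1]
  cases h2 : PySem.Chars.isIn ['p', 'a', 't', 't', 'e', 'r', 'n'] label.toList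
  case true => simp [List.foldl, h0, h1, h2]
  cases h3 : PySem.Chars.isIn ['i', 'n', 's', 'i', 'g', 'h', 't'] label.toList
  case true => simp [List.foldl, h0, h1, h2, h3]
  cases h4 : PySem.Chars.isIn ['l', 'e', 'a', 'r', 'n', 'i', 'n', 'g'] label.toList
  case true => simp [List.foldl, h0, h1, h2, h3, h4]
  cases h5 : PySem.Chars.isIn ['u', 'n', 'd', 'e', 'r', 's', 't', 'a', 'n', 'd', 'i', 'n', 'g'] label.toList
  case true => simp [List.foldl, h0, h1, h2, h3, h4, h5]
  cases h6 : PySem.Chars.isIn ['c', 'o', 'l', 'o', 'r'] label.toList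
  case true => simp [List.foldl, h0, h1, h2, h3, h4, h5, h6]
  cases h7 : PySem.Chars.isIn ['r', 'h', 'y', 't', 'h', 'm'] label.toList
  case true => simp [List.foldl, h0, h1, h2, h3, h4, h5, h6, h7]
  cases h8 : PySem.Chars.isIn ['s', 'e', 'n', 's', 'o', 'r', 'y'] label.toList
  case true => simp [List.foldl, h0, h1, h2, h3, h4, h5, h6, h7, h8]
  cases h9 : PySem.Chars.isIn ['e', 'm', 'o', 't', 'i', 'o', 'n'] label.toList
  case true => simp [List.foldl, h0, h1, h2, h3, h4, h5, h6, h7, h8, h9]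
  cases h10 : PySem.Chars.isIn ['f', 'e', 'e', 'l', 'i', 'n', 'g'] label.toList
  case true => simp [List.foldl, h0, h1, h2, h3, h4, h5, h6, h7, h8, h9, h10]
  cases h11 : PySem.Chars.isIn ['p', 'r', 'a', 'c', 't', 'i', 'c', 'e'] label.toList
  case true => simp [List.foldl, h0, h1, h2, h3, h4, h5, h6, h7, h8, h9, h10, h11]
  cases h12 : PySem.Chars.isIn ['t', 'i', 'm', 'e'] label.toList
  case true => simp [List.foldl, h0, h1, h2, h3, h4, h5, h6, h7, h8, h9, h10, h11, h12]
  cases h13 : PySem.Chars.isIn ['n', 'o', 'v', 'e', 'l'] label.toList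
  case true => simp [List.foldl, h0, h1, h2, h3, h4, h5, h6, h7, h8, h9, h10, h11, h12, h13]
  cases h14 : PySem.Chars.isIn ['c', 'r', 'e', 'a', 't', 'e'] label.toList
  case true => simp [List.foldl, h0, h1, h2, h3, h4, h5, h6, h7, h8, h9, h10, h11, h12, h13, h14]
  cases h15 : PySem.Chars.isIn ['p', 'h', 'y', 's', 'i', 'c', 's'] label.toList
  case true => simp [List.foldl, h0, h1, h2, h3, h4, h5, h6, h7, h8, h9, h10, h11, h12, h13, h14, h15]
  cases h16 : PySem.Chars.isIn ['b', 'i', 'o', 'l', 'o', 'g', 'y'] label.toList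
  case true => simp [List.foldl, h0, h1, h2, h3, h4, h5, h6, h7, h8, h9, h10, h11, h12, h13, h14, h15, h16]
  cases h17 : PySem.Chars.isIn ['m', 'e', 't', 'a'] label.toList
  case true => simp [List.foldl, h0, h1, h2, h3, h4, h5, h6, h7, h8, h9, h10, h11, h12, h13, h14, h15, h16, h17]
  cases h18 : PySem.Chars.isIn ['s', 't', 'r', 'a', 't', 'e', 'g', 'y'] label.toList
  case true => simp [List.foldl, h0, h1, h2, h3, h4, h5, h6, h7, h8, h9, h10, h11, h12, h13, h14, h15, h16, h17, h18]
  cases h19 : PySem.Chars.isIn ['b', 'a', 'l', 'a', 'n', 'c', 'e'] label.toList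
  case true => simp [List.foldl, h0, h1, h2, h3, h4, h5, h6, h7, h8, h9, h10, h11, h12, h13, h14, h15, h16, h17, h18, h19]
  cases h20 : PySem.Chars.isIn ['e', 'q', 'u', 'i', 'l', 'i', 'b', 'r', 'i', 'u', 'm'] label.toList
  case true => simp [List.foldl, h0, h1, h2, h3, h4, h5, h6, h7, h8, h9, h10, h11, h12, h13, h14, h15, h16, h17, h18, h19, h20]
  cases h21 : PySem.Chars.isIn ['a', 'b', 's', 't', 'r', 'a', 'c', 't'] label.toList
  case true => simp [List.foldl, h0, h1, h2, h3, h4, h5, h6, h7, h8, h9, h10, h11, h12, h13, h14, h15, h16, h17, h18, h19, h20, h21]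
  cases h22 : PySem.Chars.isIn ['e', 'm', 'e', 'r', 'g', 'e', 'n', 'c', 'e'] label.toList
  case true => simp [List.foldl, h0, h1, h2, h3, h4, h5, h6, h7, h8, h9, h10, h11, h12, h13, h14, h15, h16, h17, h18, h19, h20, h21, h22]
  cases h23 : PySem.Chars.isIn ['-'] label.toList
  case true => simp [List.foldl, h0, h1, h2, h3, h4, h5, h6, h7, h8, h9, h10, h11, h12, h13, h14, h15, h16, h17, h18, h19, h20, h21, h22, h23]
  cases h24 : PySem.Chars.isIn ['a', 'n', 'i', 'm', 'a', 'l'] label.toList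
  case true => simp [List.foldl, h0, h1, h2, h3, h4, h5, h6, h7, h8, h9, h10, h11, h12, h13, h14, h15, h16, h17, h18, h19, h20, h21, h22, h23, h24]
  cases h25 : PySem.Chars.isIn ['m', 'a', 'm', 'm', 'a', 'l'] label.toList
  case true => simp [List.foldl, h0, h1, h2, h3, h4, h5, h6, h7, h8, h9, h10, h11, h12, h13, h14, h15, h16, h17, h18, h19, h20, h21, h22, h23, h24, h25]
  cases h26 : PySem.Chars.isIn ['t', 'e', 'a', 'c', 'h', 'e', 'r'] label.toList
  case true => simp [List.foldl, h0, h1, h2, h3, h4, h5, h6, h7, h8, h9, h10, h11, h12, h13, h14, h15, h16, h17, h18, h19, h20, h21, h22, h23, h24, h25, h26]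
  cases h27 : PySem.Chars.isIn ['m', 'e', 'n', 't', 'o', 'r'] label.toList
  case true => simp [List.foldl, h0, h1, h2, h3, h4, h5, h6, h7, h8, h9, h10, h11, h12, h13, h14, h15, h16, h17, h18, h19, h20, h21, h22, h23, h24, h25, h26, h27]
  cases h28 : PySem.Chars.isIn ['p', 'a', 'r', 'e', 'n', 't'] label.toList
  case true => simp [List.foldl, h0, h1, h2, h3, h4, h5, h6, h7, h8, h9, h10, h11, h12, h13, h14, h15, h16, h17, h18, h19, h20, h21, h22, h23, h24, h25, h26, h27, h28]
  cases h29 : PySem.Chars.isIn ['q', 'u', 'a', 'n', 't', 'u', 'm'] label.toList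
  case true => simp [List.foldl, h0, h1, h2, h3, h4, h5, h6, h7, h8, h9, h10, h11, h12, h13, h14, h15, h16, h17, h18, h19, h20, h21, h22, h23, h24, h25, h26, h27, h28, h29]
  cases h30 : PySem.Chars.isIn ['n', 'e', 'u', 'r', 'a', 'l'] label.toList
  case true => simp [List.foldl, h0, h1, h2, h3, h4, h5, h6, h7, h8, h9, h10, h11, h12, h13, h14, h15, h16, h17, h18, h19, h20, h21, h22, h23, h24, h25, h26, h27, h28, h29, h30]
  cases h31 : PySem.Chars.isIn ['d', 'a', 't', 'a', 'b', 'a', 's', 'e'] label.toList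
  case true => simp [List.foldl, h0, h1, h2, h3, h4, h5, h6, h7, h8, h9, h10, h11, h12, h13, h14, h15, h16, h17, h18, h19, h20, h21, h22, h23, h24, h25, h26, h27, h28, h29, h30, h31]
  simp [List.foldl, h0, h1, h2, h3, h4, h5, h6, h7, h8, h9, h10, h11, h12, h13, h14, h15, h16, h17, h18, h19, h20, h21, h22, h23, h24, h25, h26, h27, h28, h29, h30, h31]
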